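-- pv_equiv track=rewrite | github.com/Brun0oO/breathingMonitor | main.py | countCrossing
-- ===== SOURCE A (Python) =====
-- def countCrossing(arr, avg):
--     """
--     Counts how many times the values cross the average.
--     Only counts when going down.
--     Returns the count
--     """
--     state = 0
--     cnt = 0
--     for i in arr:
--         if state == 1 and i < avg:
--             state = 2
--             cnt += 1
--         elif state == 2 and i > avg:
--             state = 1
--         elif state == 0:
--             if i > avg:
--                 state = 1
--             else:
--                 state = 2
--     return cnt
-- ===== SOURCE B (Python) =====
-- def countCrossing(arr, avg):
--     signs = [1 if i > avg else -1 for i in arr if i != avg]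
--     return sum(1 for a, b in zip(signs, signs[1:]) if a == 1 and b == -1)
-- ===== Notes on version B (the rewrite author's own statement) =====
-- stated objective: alternative
-- what changed: Replaces the three-way state machine with a materialized filtered sign list (+1/-1, equals-to-avg dropped) and a pairwise zip scan counting +1,-1 adjacent pairs.
import Mathlib
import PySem

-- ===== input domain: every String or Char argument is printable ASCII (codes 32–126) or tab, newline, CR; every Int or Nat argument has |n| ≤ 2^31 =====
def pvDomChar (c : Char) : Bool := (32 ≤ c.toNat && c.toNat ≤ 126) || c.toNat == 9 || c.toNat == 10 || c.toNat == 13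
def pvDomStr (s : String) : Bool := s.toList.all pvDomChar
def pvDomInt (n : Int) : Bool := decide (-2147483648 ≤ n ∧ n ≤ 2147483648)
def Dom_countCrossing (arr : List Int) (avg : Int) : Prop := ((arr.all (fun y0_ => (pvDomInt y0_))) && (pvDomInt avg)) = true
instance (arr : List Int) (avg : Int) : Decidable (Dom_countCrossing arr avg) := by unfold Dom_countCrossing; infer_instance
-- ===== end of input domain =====

-- B replaces A's three-way state machine by a filtered sign list plus a pairwise scan (objective: alternative, same cost).

-- ===== PORT A =====
-- literal transliteration: loop state (state, cnt), branches in source order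
def countCrossing (arr : List Int) (avg : Int) : Int :=
  (arr.foldl (fun (s : Int × Int) i =>
      if s.1 = 1 ∧ i < avg then (2, s.2 + 1)
      else if s.1 = 2 ∧ i > avg then (1, s.2)
      else if s.1 = 0 then (if i > avg then (1, s.2) else (2, s.2))
      else s)
    (0, 0)).2

-- ===== PORT B =====
-- literal transliteration of Source B: filtered sign list, then sum over zip(signs, signs[1:])
def countCrossing_alt (arr : List Int) (avg : Int) : Int :=
  let signs : List Int := (arr.filter (fun i => i != avg)).map (fun i => if i > avg then 1 else -1)
  (signs.zip signs.tail).foldl (fun c p => if p.1 = 1 ∧ p.2 = -1 then c + 1 else c) 0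

-- ===== PRECONDITION & SPEC =====
def Spec_countCrossing (arr : List Int) (avg : Int) (out : Int) : Prop := out = countCrossing_alt arr avg
instance (arr : List Int) (avg : Int) (out : Int) : Decidable (Spec_countCrossing arr avg out) := by unfold Spec_countCrossing; infer_instance

-- ===== CLAIM (what is proved, stated in full; the proofs are below) =====
def Claim_equal_countCrossing : Prop := ∀ (arr : List Int) (avg : Int), Dom_countCrossing arr avg → Spec_countCrossing arr avg (countCrossing arr avg)

-- ===== LEMMAS AND PROOFS =====

-- number of adjacent (+1, -1) pairs in a sign list
def pvPairCount : List Int → Int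
  | a :: b :: t => (if a = 1 ∧ b = -1 then 1 else 0) + pvPairCount (b :: t)
  | _ => 0

theorem pvFoldlZip_eq_pairCount (l : List Int) (c : Int) :
    (l.zip l.tail).foldl (fun c p => if p.1 = 1 ∧ p.2 = -1 then c + 1 else c) c = c + pvPairCount l := by
  induction l generalizing c with
  | nil => simp [pvPairCount]
  | cons a l ih =>
    cases l with
    | nil => simp [pvPairCount]
    | cons b t =>
      simp only [List.tail_cons] at ih
      simp only [List.tail_cons, List.zip_cons_cons, List.foldl_cons]
      rw [ih]
      simp only [pvPairCount]
      split_ifs <;> ring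

theorem pvPairCount_negOne (l : List Int) : pvPairCount (-1 :: l) = pvPairCount l := by
  cases l with
  | nil => simp [pvPairCount]
  | cons b t => simp [pvPairCount]

-- sign list of B
def pvSigns (arr : List Int) (avg : Int) : List Int :=
  (arr.filter (fun i => i != avg)).map (fun i => if i > avg then 1 else -1)

def pvAux (avg : Int) (s : Int) (arr : List Int) : Int :=
  if s = 1 then pvPairCount (1 :: pvSigns arr avg)
  else if s = 2 then pvPairCount (-1 :: pvSigns arr avg)
  else if s = 0 then pvPairCount (pvSigns arr avg)
  else 0

theorem pvSigns_cons (arr : List Int) (avg i : Int) :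
    pvSigns (i :: arr) avg =
      if i = avg then pvSigns arr avg
      else (if i > avg then 1 else -1) :: pvSigns arr avg := by
  simp only [pvSigns, List.filter_cons]
  by_cases h : i = avg <;> simp [h]

theorem pvLoop_invariant (avg : Int) (arr : List Int) : ∀ (s c : Int),
    (arr.foldl (fun (st : Int × Int) i =>
      if st.1 = 1 ∧ i < avg then (2, st.2 + 1)
      else if st.1 = 2 ∧ i > avg then (1, st.2)
      else if st.1 = 0 then (if i > avg then (1, st.2) else (2, st.2))
      else st) (s, c)).2 = c + pvAux avg s arr := by
  induction arr with
  | nil => intro s c; simp only [List.foldl_nil, pvAux, pvSigns, pvPairCount]; split_ifs <;> simp [pvPairCount]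
  | cons i arr ih =>
    intro s c
    simp only [List.foldl_cons]
    rcases lt_trichotomy i avg with hlt | heq | hgt
    · have hne : ¬ i = avg := by omega
      have hng : ¬ i > avg := by omega
      by_cases h1 : s = 1 <;> by_cases h2 : s = 2 <;> by_cases h0 : s = 0 <;>
        first
          | omega
          | (simp only [h1, h2, h0, hlt, hng, and_true, and_false, if_true, if_false,
               if_pos rfl, reduceIte]
             rw [ih]
             simp [pvAux, pvSigns_cons, hne, hng, hlt, pvPairCount, pvPairCount_negOne, h1, h2, h0]
             try ring)
    · have hng : ¬ i > avg := by omega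
      have hnl : ¬ i < avg := by omega
      by_cases h1 : s = 1 <;> by_cases h2 : s = 2 <;> by_cases h0 : s = 0 <;>
        first
          | omega
          | (simp only [h1, h2, h0, hng, hnl, and_true, and_false, if_true, if_false,
               if_pos rfl, reduceIte]
             rw [ih]
             simp [pvAux, pvSigns_cons, heq, hng, hnl, pvPairCount, pvPairCount_negOne, h1, h2, h0]
             try ring)
    · have hne : ¬ i = avg := by omega
      have hnl : ¬ i < avg := by omega
      by_cases h1 : s = 1 <;> by_cases h2 : s = 2 <;> by_cases h0 : s = 0 <;>
        first
          | omega
          | (simp only [h1, h2, h0, hgt, hnl, and_true, and_false, if_true, if_false,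
               if_pos rfl, reduceIte]
             rw [ih]
             simp [pvAux, pvSigns_cons, hne, hgt, hnl, pvPairCount, pvPairCount_negOne, h1, h2, h0]
             try ring)

-- ===== VERDICT (by name: the statement is the Claim_ definition above) =====
theorem countCrossing_spec : Claim_equal_countCrossing := by
  intro arr avg _
  unfold Spec_countCrossing countCrossing countCrossing_alt
  rw [pvLoop_invariant, pvFoldlZip_eq_pairCount]
  simp [pvAux, pvSigns]
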